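-- pv_equiv track=rewrite | github.com/chenchc/ML2016 | hw1/linear_regression/linear_regression.py | getFeatureMatrixGivenTimeSeries
-- ===== SOURCE A (Python) =====
-- FEATURE_TIMESPAN = 9
--
-- def getFeatureMatrixGivenTimeSeries(timeSeries):
--     featureMatrix = []
--     for i in range(len(timeSeries) - FEATURE_TIMESPAN):
--         featureRow = []
--         for j in range(FEATURE_TIMESPAN):
--             featureRow.extend(timeSeries[i + j])
--
--         featureMatrix.append(featureRow)
--
--     return featureMatrix
-- ===== SOURCE B (Python) =====
-- FEATURE_TIMESPAN = 9
--
-- def getFeatureMatrixGivenTimeSeries(timeSeries):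
--     m = len(timeSeries) - FEATURE_TIMESPAN
--     if m < 0:
--         m = 0
--     columns = [timeSeries[j:j + m] for j in range(FEATURE_TIMESPAN)]
--     return [[x for sub in window for x in sub] for window in zip(*columns)]
-- ===== Notes on version B (the rewrite author's own statement) =====
-- stated objective: idiomatic
-- what changed: Replaces A's index-driven nested loops (row by row, extend per window element) with a column-wise construction: nine shifted slice columns combined with zip(*columns) into windows that are flattened by a comprehension.
import Mathlib
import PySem

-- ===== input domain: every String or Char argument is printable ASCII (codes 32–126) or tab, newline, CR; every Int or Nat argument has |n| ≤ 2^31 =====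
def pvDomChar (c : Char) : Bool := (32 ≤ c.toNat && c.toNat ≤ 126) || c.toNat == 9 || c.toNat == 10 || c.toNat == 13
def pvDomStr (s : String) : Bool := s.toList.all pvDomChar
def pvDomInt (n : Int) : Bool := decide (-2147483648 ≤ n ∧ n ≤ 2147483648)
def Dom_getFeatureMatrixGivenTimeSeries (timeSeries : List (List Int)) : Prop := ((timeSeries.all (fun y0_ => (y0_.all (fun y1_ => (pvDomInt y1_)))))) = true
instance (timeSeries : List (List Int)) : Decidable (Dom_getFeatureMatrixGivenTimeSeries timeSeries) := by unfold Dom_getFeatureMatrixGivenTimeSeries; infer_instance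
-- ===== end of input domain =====

-- B builds the matrix column-wise (nine shifted slice columns combined by zip) instead of A's
-- index-driven nested row loops; objective: idiomatic. Return values proved equal on all inputs.

-- ===== PORT A =====
-- Port of A: for i in range(len(ts) - 9): row = []; for j in range(9): row.extend(ts[i+j]).
-- ts[i+j] is always in range here (0 ≤ i < len-9, 0 ≤ j < 9), so pyGetD with default [] is exact.
def getFeatureMatrixGivenTimeSeries (timeSeries : List (List Int)) : List (List Int) :=
  (PySem.List.pyRange 0 ((timeSeries.length : Int) - 9) 1).foldl
    (fun featureMatrix i =>
      featureMatrix ++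
        [(PySem.List.pyRange 0 9 1).foldl
          (fun featureRow j => featureRow ++ PySem.List.pyGetD timeSeries (i + j) []) []])
    []

-- ===== PORT B =====
-- helper for zip(*columns): first elements of every column, paired with the remaining tails
-- (none = some column is exhausted, i.e. the zip stops).
def pvZipHeads? : List (List (List Int)) → Option (List (List Int) × List (List (List Int)))
  | [] => some ([], [])
  | [] :: _ => none
  | (x :: xs) :: rest =>
    match pvZipHeads? rest with
    | none => none
    | some (hs, tls) => some (x :: hs, xs :: tls)

def pvColsSize (cols : List (List (List Int))) : Nat := (cols.map List.length).sum

-- termination measure fact for pvZipStar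
theorem pvZipHeads?_size : ∀ (cols : List (List (List Int))) (hs : List (List Int))
    (tls : List (List (List Int))), pvZipHeads? cols = some (hs, tls) →
    pvColsSize tls + cols.length = pvColsSize cols := by
  intro cols
  induction cols with
  | nil => intro hs tls h; simp [pvZipHeads?] at h; simp [h.2, pvColsSize]
  | cons c cs ih =>
    intro hs tls h
    match c with
    | [] => simp [pvZipHeads?] at h
    | x :: xs =>
      simp only [pvZipHeads?] at h
      cases hrec : pvZipHeads? cs with
      | none => rw [hrec] at h; simp at h
      | some p =>
        rw [hrec] at h
        obtain ⟨hs', tls'⟩ := p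
        simp at h
        have := ih hs' tls' hrec
        simp [← h.2, pvColsSize] at *
        omega

-- Python's zip(*cols): transpose truncated at the shortest column (zip() of no iterables is empty).
def pvZipStar (cols : List (List (List Int))) : List (List (List Int)) :=
  match cols with
  | [] => []
  | c :: cs =>
    match h : pvZipHeads? (c :: cs) with
    | none => []
    | some (hs, tls) => hs :: pvZipStar tls
termination_by pvColsSize cols
decreasing_by
  have := pvZipHeads?_size (c :: cs) hs tls h
  simp [pvColsSize] at *
  omega

-- Port of B: m = max(len-9, 0); columns = [ts[j:j+m] for j in range(9)];
-- rows = [flatten(window) for window in zip(*columns)].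
def getFeatureMatrixGivenTimeSeries_alt (timeSeries : List (List Int)) : List (List Int) :=
  let m0 : Int := (timeSeries.length : Int) - 9
  let m : Int := if m0 < 0 then 0 else m0
  let columns := (PySem.List.pyRange 0 9 1).map
    (fun j => PySem.List.slice timeSeries (some j) (some (j + m)))
  (pvZipStar columns).map (fun window => window.flatten)

-- ===== PRECONDITION & SPEC =====
def Spec_getFeatureMatrixGivenTimeSeries (timeSeries : List (List Int)) (out : List (List Int)) : Prop := out = getFeatureMatrixGivenTimeSeries_alt timeSeries
instance (timeSeries : List (List Int)) (out : List (List Int)) : Decidable (Spec_getFeatureMatrixGivenTimeSeries timeSeries out) := by unfold Spec_getFeatureMatrixGivenTimeSeries; infer_instance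

-- ===== CLAIM (what is proved, stated in full; the proofs are below) =====
def Claim_equal_getFeatureMatrixGivenTimeSeries : Prop := ∀ (timeSeries : List (List Int)), Dom_getFeatureMatrixGivenTimeSeries timeSeries → Spec_getFeatureMatrixGivenTimeSeries timeSeries (getFeatureMatrixGivenTimeSeries timeSeries)

-- ===== LEMMAS AND PROOFS =====

-- the common model: row i is the flattening of the 9-element window starting at i
def pvModel (ts : List (List Int)) : List (List Int) :=
  (List.range (ts.length - 9)).map (fun i => ((ts.drop i).take 9).flatten)

theorem pv_take_succ_getD (ts : List (List Int)) (j m : Nat) (h : j < ts.length) :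
    (ts.drop j).take (m + 1) = ts.getD j [] :: (ts.drop (j + 1)).take m := by
  rw [List.drop_eq_getElem_cons h, List.take_succ_cons, List.getD_eq_getElem?_getD,
    List.getElem?_eq_getElem h]
  rfl

theorem pv_take_drop_eq_map_range (ts : List (List Int)) (k : Nat) : ∀ (i : Nat),
    i + k ≤ ts.length →
    (ts.drop i).take k = (List.range k).map (fun j => ts.getD (i + j) []) := by
  induction k with
  | zero => intro i _; simp
  | succ k ih =>
    intro i h
    rw [pv_take_succ_getD ts i k (by omega), List.range_succ_eq_map, List.map_cons,
      List.map_map, ih (i + 1) (by omega)]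
    refine congrArg₂ _ (by simp) ?_
    exact List.map_congr_left (fun j _ => by simp [Function.comp]; ring_nf)

theorem pv_foldl_append_blocks (l : List Int) (g : Int → List Int) (init : List Int) :
    l.foldl (fun acc x => acc ++ g x) init = init ++ (l.map g).flatten := by
  induction l generalizing init with
  | nil => simp
  | cons x xs ih => simp [List.foldl_cons, ih, List.append_assoc]

-- the inner range(9) as a mapped Nat range (for cast bookkeeping)
theorem pv_pyRange9 : PySem.List.pyRange 0 9 1 = (List.range 9).map (fun k => ((k : Nat) : Int)) := by
  rw [PySem.List.pyRange_one]
  norm_num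
  rw [show ((9 : Int)).toNat = 9 from rfl]

-- one step of zip(*cols) on nine cons-shaped columns
theorem pvZipStar_cons9 (x0 x1 x2 x3 x4 x5 x6 x7 x8 : List Int)
    (t0 t1 t2 t3 t4 t5 t6 t7 t8 : List (List Int)) :
    pvZipStar [x0 :: t0, x1 :: t1, x2 :: t2, x3 :: t3, x4 :: t4, x5 :: t5, x6 :: t6,
      x7 :: t7, x8 :: t8]
      = [x0, x1, x2, x3, x4, x5, x6, x7, x8] :: pvZipStar [t0, t1, t2, t3, t4, t5, t6, t7, t8] := by
  rw [pvZipStar]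
  simp [pvZipHeads?]

theorem pvZipStar_empty9 :
    pvZipStar [([] : List (List Int)), [], [], [], [], [], [], [], []] = [] := by
  rw [pvZipStar]; simp [pvZipHeads?]

theorem pv_B_zip (m : Nat) : ∀ (ts : List (List Int)), m + 9 ≤ ts.length →
    pvZipStar [(ts.drop 0).take m, (ts.drop 1).take m, (ts.drop 2).take m,
      (ts.drop 3).take m, (ts.drop 4).take m, (ts.drop 5).take m, (ts.drop 6).take m,
      (ts.drop 7).take m, (ts.drop 8).take m]
      = (List.range m).map (fun i => (ts.drop i).take 9) := by
  induction m with
  | zero => intro ts _; simpa using pvZipStar_empty9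
  | succ m ih =>
    intro ts h
    have ih' := ih (ts.drop 1) (by rw [List.length_drop]; omega)
    simp only [List.drop_drop, Nat.reduceAdd] at ih'
    rw [pv_take_succ_getD ts 0 m (by omega), pv_take_succ_getD ts 1 m (by omega),
      pv_take_succ_getD ts 2 m (by omega), pv_take_succ_getD ts 3 m (by omega),
      pv_take_succ_getD ts 4 m (by omega), pv_take_succ_getD ts 5 m (by omega),
      pv_take_succ_getD ts 6 m (by omega), pv_take_succ_getD ts 7 m (by omega),
      pv_take_succ_getD ts 8 m (by omega), pvZipStar_cons9]
    simp only [Nat.reduceAdd]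
    rw [ih', List.range_succ_eq_map, List.map_cons, List.map_map]
    refine congrArg₂ _ ?_ ?_
    · rw [show (ts.drop 0).take 9 = (List.range 9).map (fun j => ts.getD (0 + j) []) from
        pv_take_drop_eq_map_range ts 9 0 (by omega)]
      simp [show List.range 9 = [0, 1, 2, 3, 4, 5, 6, 7, 8] from rfl]
    · exact List.map_congr_left (fun i _ => by simp [Function.comp, Nat.add_comm])

theorem pv_A_eq (ts : List (List Int)) : getFeatureMatrixGivenTimeSeries ts = pvModel ts := by
  unfold getFeatureMatrixGivenTimeSeries pvModel
  rw [PySem.List.foldl_append_singleton_eq_map, List.nil_append]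
  have houter : PySem.List.pyRange 0 ((ts.length : Int) - 9) 1
      = (List.range (ts.length - 9)).map (fun k => ((k : Nat) : Int)) := by
    rw [PySem.List.pyRange_one]
    rw [show (((ts.length : Int) - 9) - 0).toNat = ts.length - 9 by omega]
    exact List.map_congr_left (fun k _ => by simp)
  rw [houter, List.map_map]
  refine List.map_congr_left (fun i hi => ?_)
  have hi9 : i + 9 ≤ ts.length := by
    rw [List.mem_range] at hi; omega
  simp only [Function.comp]
  rw [pv_foldl_append_blocks, List.nil_append, pv_pyRange9, List.map_map,
    pv_take_drop_eq_map_range ts 9 i hi9]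
  refine congrArg _ (List.map_congr_left (fun j _ => ?_))
  simp only [Function.comp]
  rw [show ((i : Int) + (j : Int)) = (((i + j : Nat)) : Int) by push_cast; ring,
    PySem.List.pyGetD_natCast]

theorem pv_B_eq (ts : List (List Int)) : getFeatureMatrixGivenTimeSeries_alt ts = pvModel ts := by
  simp only [getFeatureMatrixGivenTimeSeries_alt, pv_pyRange9, List.map_map]
  by_cases hlt : (ts.length : Int) - 9 < 0
  · -- fewer than 10 sublists and len < 9: every column is empty, so the zip is empty; so is the model
    rw [if_pos hlt]
    have hcols : (List.range 9).map
        ((fun j => PySem.List.slice ts (some j) (some (j + 0))) ∘ (fun k => ((k : Nat) : Int)))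
        = (List.range 9).map (fun _ => ([] : List (List Int))) := by
      refine List.map_congr_left (fun k _ => ?_)
      simp only [Function.comp, add_zero]
      rw [PySem.List.slice_natCast]
      simp
    rw [hcols, show List.range 9 = [0, 1, 2, 3, 4, 5, 6, 7, 8] from rfl]
    simp only [List.map_cons, List.map_nil]
    rw [pvZipStar_empty9]
    simp [pvModel, show ts.length - 9 = 0 by omega]
  · rw [if_neg hlt]
    set mN : Nat := ts.length - 9 with hmN
    have hcast : ((ts.length : Int) - 9) = (mN : Int) := by omega
    rw [hcast]
    have hcols : (List.range 9).map
        ((fun j => PySem.List.slice ts (some j) (some (j + (mN : Int)))) ∘ (fun k => ((k : Nat) : Int)))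
        = (List.range 9).map (fun k => (ts.drop k).take mN) := by
      refine List.map_congr_left (fun k _ => ?_)
      simp only [Function.comp]
      rw [PySem.List.slice_natCast_add]
    rw [hcols, show List.range 9 = [0, 1, 2, 3, 4, 5, 6, 7, 8] from rfl]
    simp only [List.map_cons, List.map_nil]
    rw [pv_B_zip mN ts (by omega)]
    simp [pvModel, List.map_map, hmN]

-- ===== VERDICT (by name: the statement is the Claim_ definition above) =====
theorem getFeatureMatrixGivenTimeSeries_spec : Claim_equal_getFeatureMatrixGivenTimeSeries := by
  intro ts _
  unfold Spec_getFeatureMatrixGivenTimeSeries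
  rw [pv_A_eq, pv_B_eq]
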